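-- pv_equiv track=rewrite | github.com/pypi-data/pypi-mirror-375 | packages/trilium-py/trilium_py-1.2.3-py3-none-any.whl/trilium_py/utils/note_util.py | preprocess_note_title_list
-- ===== SOURCE A (Python) =====
-- def preprocess_note_title_list(data):
--     """
--     Optimized version of the function to preprocess the list of [title, note_id].
--     Cleans titles, removes duplicates and previous matching entries, and sorts by title length.
--     """
--
--     def clean_title(title):
--         return title.strip()
--
--     # Use an ordered dictionary to maintain insertion order while ensuring uniqueness
--     from collections import OrderedDict
--
--     cleaned_data = OrderedDict()
--
--     # Traverse the data and process each title
--     for title, note_id in data: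
--         cleaned_title = clean_title(title)
--         if cleaned_title in cleaned_data:
--             # If the title already exists, remove it
--             del cleaned_data[cleaned_title]
--         else:
--             # Otherwise, add it to the dictionary
--             cleaned_data[cleaned_title] = note_id
--
--     # Convert the dictionary back to a list and sort by title length (descending)
--     return sorted(cleaned_data.items(), key=lambda x: len(x[0]), reverse=True)
-- ===== SOURCE B (Python) =====
-- def preprocess_note_title_list(data):
--     # One pass: count occurrences of each cleaned title, remembering the last
--     # note_id and last position; a title survives iff its count is odd, and the
--     # tie order for equal lengths is last-occurrence order.
--     info = {}
--     for i, (title, note_id) in enumerate(data):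
--         t = title.strip()
--         cnt = info[t][0] if t in info else 0
--         info[t] = (cnt + 1, note_id, i)
--     items = [(t, c[1], c[2]) for t, c in info.items() if c[0] % 2 == 1]
--     items.sort(key=lambda x: x[2])
--     result = [(t, nid) for t, nid, _ in items]
--     result.sort(key=lambda x: len(x[0]), reverse=True)
--     return result
-- ===== Notes on version B (the rewrite author's own statement) =====
-- stated objective: alternative
-- what changed: Replaces the toggle OrderedDict (insert/delete per occurrence) by a single counting pass recording count, last note_id and last index per cleaned title, then selects odd-count titles and restores the toggle order by sorting on last index before the stable length-descending sort.
import Mathlib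
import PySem

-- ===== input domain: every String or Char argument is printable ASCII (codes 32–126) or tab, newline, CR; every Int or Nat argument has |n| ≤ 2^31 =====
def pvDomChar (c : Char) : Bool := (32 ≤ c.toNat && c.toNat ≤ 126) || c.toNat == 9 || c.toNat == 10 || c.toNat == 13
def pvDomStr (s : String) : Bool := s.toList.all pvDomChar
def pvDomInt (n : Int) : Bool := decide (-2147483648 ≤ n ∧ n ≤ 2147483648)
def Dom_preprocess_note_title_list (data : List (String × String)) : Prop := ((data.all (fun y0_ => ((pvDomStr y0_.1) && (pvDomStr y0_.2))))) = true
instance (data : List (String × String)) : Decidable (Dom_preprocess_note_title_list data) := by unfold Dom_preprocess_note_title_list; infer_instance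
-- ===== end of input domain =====

-- B replaces A's toggle OrderedDict by one counting pass (count, last note_id, last index
-- per cleaned title) plus an index sort restoring the toggle order: an alternative decomposition.

-- ===== PORT A =====
def preprocess_note_title_list (data : List (String × String)) : List (String × String) :=
  let cleaned_data := data.foldl (fun d p =>
    let cleaned_title := PySem.Str.strip p.1
    if d.contains cleaned_title then d.erase cleaned_title
    else d.insert cleaned_title p.2) (PySem.Dict.empty : PySem.Dict String String)
  PySem.List.sorted cleaned_data.items (fun x => PySem.Str.len x.1) true

-- ===== PORT B =====
def preprocess_note_title_list_alt (data : List (String × String)) : List (String × String) :=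
  let info := (PySem.List.enumerate data).foldl (fun info q =>
    let t := PySem.Str.strip q.2.1
    -- q.2.2 is note_id, q.1 is the index i; 'info[t][0] if t in info else 0' is exact here
    let cnt := if info.contains t then (info.getD t (0, "", 0)).1 else 0
    info.insert t (cnt + 1, q.2.2, q.1)) (PySem.Dict.empty : PySem.Dict String (Int × String × Int))
  let items := info.items.filter (fun p => PySem.Int.mod p.2.1 2 == 1)
  let items2 := PySem.List.sorted items (fun p => p.2.2.2) false
  let result := items2.map (fun p => (p.1, p.2.2.1))
  PySem.List.sorted result (fun x => PySem.Str.len x.1) true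

-- ===== PRECONDITION & SPEC =====
def Spec_preprocess_note_title_list (data : List (String × String)) (out : List (String × String)) : Prop := out = preprocess_note_title_list_alt data
instance (data : List (String × String)) (out : List (String × String)) : Decidable (Spec_preprocess_note_title_list data out) := by unfold Spec_preprocess_note_title_list; infer_instance

-- ===== CLAIM (what is proved, stated in full; the proofs are below) =====
def Claim_equal_preprocess_note_title_list : Prop := ∀ (data : List (String × String)), Dom_preprocess_note_title_list data → Spec_preprocess_note_title_list data (preprocess_note_title_list data)

-- ===== LEMMAS AND PROOFS =====

-- A's loop state after a prefix, as a function of B's loop state: A's item list is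
-- (a permutation of) the odd-count entries of B's dict, ordered by last index.
theorem pv_items_erase {κ ν : Type} [BEq κ] (d : PySem.Dict κ ν) (k : κ) :
    (d.erase k).items = d.items.filter (fun p => !(p.1 == k)) := rfl

theorem pv_invariant (l : List (String × String)) :
    ∀ (k : Int) (dA : PySem.Dict String String)
      (dB : PySem.Dict String (Int × String × Int))
      (F : List (String × (Int × String × Int))),
      dB.keys.Nodup →
      (∀ p ∈ dB.items, p.2.2.2 < k) →
      F.Perm (dB.items.filter (fun p => PySem.Int.mod p.2.1 2 == 1)) →
      F.Pairwise (fun a b => a.2.2.2 < b.2.2.2) →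
      dA.items = F.map (fun p => (p.1, p.2.2.1)) →
      ∃ F' : List (String × (Int × String × Int)),
        (let dB' := (PySem.List.enumerate l k).foldl (fun info q =>
            let t := PySem.Str.strip q.2.1
            let cnt := if info.contains t then (info.getD t (0, "", 0)).1 else 0
            info.insert t (cnt + 1, q.2.2, q.1)) dB
         let dA' := l.foldl (fun d p =>
            let cleaned_title := PySem.Str.strip p.1
            if d.contains cleaned_title then d.erase cleaned_title
            else d.insert cleaned_title p.2) dA
         F'.Perm (dB'.items.filter (fun p => PySem.Int.mod p.2.1 2 == 1)) ∧
         F'.Pairwise (fun a b => a.2.2.2 < b.2.2.2) ∧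
         dA'.items = F'.map (fun p => (p.1, p.2.2.1))) := by
  induction l with
  | nil =>
    intro k dA dB F hnd hbound hperm hpair hitems
    exact ⟨F, by simpa [PySem.List.enumerate_nil] using hperm, hpair, by simpa using hitems⟩
  | cons p rest ih =>
    intro k dA dB F hnd hbound hperm hpair hitems
    rw [PySem.List.enumerate_cons]
    dsimp only [List.foldl_cons]
    set t := PySem.Str.strip p.1 with ht
    have hFsub : ∀ x ∈ F, x ∈ dB.items := fun x hx =>
      List.mem_of_mem_filter (hperm.subset hx)
    have haKeys : ∀ x, dA.contains x = true ↔
        x ∈ (dB.items.filter (fun q => PySem.Int.mod q.2.1 2 == 1)).map Prod.fst := by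
      intro x
      rw [PySem.Dict.contains_iff_mem_keys]
      have hk : dA.keys = F.map Prod.fst := by
        show dA.items.map _ = _
        rw [hitems, List.map_map]; rfl
      rw [hk, ← (hperm.map Prod.fst).mem_iff]
    by_cases hc : dB.contains t = true
    · -- existing key: one entry (t, v) in dB.items
      have hv : ∃ v, dB.get? t = some v := by
        have h := PySem.Dict.contains_eq_isSome_get? (d := dB) (k := t)
        rw [hc] at h
        exact Option.isSome_iff_exists.mp h.symm
      obtain ⟨v, hv⟩ := hv
      have hmemv : (t, v) ∈ dB.items := PySem.Dict.mem_items_of_get?_eq_some _ hv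
      obtain ⟨L1, L2, hsplit⟩ := List.append_of_mem hmemv
      have hndk : (L1.map Prod.fst ++ t :: L2.map Prod.fst).Nodup := by
        have h0 : (dB.items.map Prod.fst).Nodup := hnd
        rw [hsplit] at h0
        simpa using h0
      have hd := List.nodup_append.mp hndk
      have hL1 : ∀ x ∈ L1, x.1 ≠ t := by
        intro x hx he
        exact hd.2.2 t (List.mem_map.2 ⟨x, hx, he⟩) t List.mem_cons_self rfl
      have hL2 : ∀ x ∈ L2, x.1 ≠ t := by
        intro x hx he
        exact (List.nodup_cons.mp hd.2.1).1 (he ▸ List.mem_map.2 ⟨x, hx, rfl⟩)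
      have hgetD : dB.getD t ((0 : Int), "", (0 : Int)) = v :=
        PySem.Dict.getD_of_get?_eq_some _ _ hv
      simp only [hc, if_true, hgetD]
      have hmap : ∀ w : Int × String × Int, (dB.insert t w).items = L1 ++ (t, w) :: L2 := by
        intro w
        rw [PySem.Dict.items_insert_of_contains _ _ hc, hsplit, List.map_append, List.map_cons]
        have e1 : L1.map (fun q => if (q.1 == t) = true then (t, w) else q) = L1 :=
          (List.map_congr_left (fun x hx => by simp [hL1 x hx])).trans (List.map_id _)
        have e2 : L2.map (fun q => if (q.1 == t) = true then (t, w) else q) = L2 :=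
          (List.map_congr_left (fun x hx => by simp [hL2 x hx])).trans (List.map_id _)
        rw [e1, e2]
        simp
      have hm1 : PySem.Int.mod v.1 2 = v.1 % 2 := PySem.Int.mod_eq_emod_of_pos (by norm_num)
      have hm2 : PySem.Int.mod (v.1 + 1) 2 = (v.1 + 1) % 2 :=
        PySem.Int.mod_eq_emod_of_pos (by norm_num)
      have hboundB : ∀ q ∈ (dB.insert t (v.1 + 1, p.2, k)).items, q.2.2.2 < k + 1 := by
        intro q hq
        rcases (PySem.Dict.mem_items_insert _ _ _ _).1 hq with h | ⟨h, _⟩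
        · subst h; simp
        · exact lt_trans (hbound q h) (by omega)
      by_cases hodd : (PySem.Int.mod v.1 2 == 1) = true
      · -- count was odd: the title is currently in A; A deletes it, B's entry turns even
        have hAt : dA.contains t = true :=
          (haKeys t).mpr (List.mem_map.2 ⟨(t, v), List.mem_filter.2 ⟨hmemv, hodd⟩, rfl⟩)
        simp only [hAt, if_true]
        have hodd' : v.1 % 2 = 1 := by rw [hm1] at hodd; simpa using hodd
        have hoddn : ((PySem.Int.mod (v.1 + 1) 2 == 1) = false) := by
          rw [hm2]; simp only [beq_eq_false_iff_ne, ne_eq]; omega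
        have hfO : dB.items.filter (fun q => PySem.Int.mod q.2.1 2 == 1)
            = L1.filter (fun q => PySem.Int.mod q.2.1 2 == 1) ++ (t, v) ::
              L2.filter (fun q => PySem.Int.mod q.2.1 2 == 1) := by
          rw [hsplit, List.filter_append, List.filter_cons]
          simp only [hodd, if_true]
        have hfN : (dB.insert t (v.1 + 1, p.2, k)).items.filter
              (fun q => PySem.Int.mod q.2.1 2 == 1)
            = L1.filter (fun q => PySem.Int.mod q.2.1 2 == 1) ++
              L2.filter (fun q => PySem.Int.mod q.2.1 2 == 1) := by
          rw [hmap, List.filter_append, List.filter_cons]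
          simp only [hoddn, Bool.false_eq_true, if_false]
        have hfix : ∀ L : List (String × Int × String × Int), (∀ x ∈ L, x.1 ≠ t) →
            (L.filter (fun q => PySem.Int.mod q.2.1 2 == 1)).filter (fun x => !(x.1 == t))
            = L.filter (fun q => PySem.Int.mod q.2.1 2 == 1) := by
          intro L hL
          refine List.filter_eq_self.mpr (fun x hx => by
            simp [hL x (List.mem_of_mem_filter hx)])
        obtain ⟨F', h1, h2, h3⟩ := ih (k + 1) (dA.erase t) (dB.insert t (v.1 + 1, p.2, k))
            (F.filter (fun x => !(x.1 == t)))
            (PySem.Dict.nodup_keys_insert _ _ _ hnd)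
            hboundB
            (by
              refine (hperm.filter _).trans ?_
              rw [hfO, hfN, List.filter_append, List.filter_cons]
              simp only [BEq.rfl, Bool.not_true]
              rw [hfix L1 hL1, hfix L2 hL2]
              simp)
            (hpair.filter _)
            (by
              rw [pv_items_erase, hitems, List.filter_map]
              rfl)
        exact ⟨F', h1, h2, h3⟩
      · -- count was even: the title is currently absent from A; both re-add it at the end
        have hoddb : ((PySem.Int.mod v.1 2 == 1) = false) := by simpa using hodd
        have hAt : dA.contains t = false := by
          rw [Bool.eq_false_iff]
          intro hA
          rcases List.mem_map.1 ((haKeys t).mp hA) with ⟨x, hx, hx1⟩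
          have hpred := (List.mem_filter.1 hx).2
          have hxm := List.mem_of_mem_filter hx
          rw [hsplit] at hxm
          have hxe : x = (t, v) := by
            rcases List.mem_append.1 hxm with h | h
            · exact absurd hx1 (hL1 x h)
            · rcases List.mem_cons.1 h with h | h
              · exact h
              · exact absurd hx1 (hL2 x h)
          rw [hxe] at hpred
          simp only [hoddb] at hpred
          exact Bool.false_ne_true hpred
        simp only [hAt, if_false, Bool.false_eq_true]
        have hodd' : ¬ (v.1 % 2 = 1) := by rw [hm1] at hoddb; simpa using hoddb
        have hoddn : ((PySem.Int.mod (v.1 + 1) 2 == 1) = true) := by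
          rw [hm2]; simp only [beq_iff_eq]; omega
        have hfO : dB.items.filter (fun q => PySem.Int.mod q.2.1 2 == 1)
            = L1.filter (fun q => PySem.Int.mod q.2.1 2 == 1) ++
              L2.filter (fun q => PySem.Int.mod q.2.1 2 == 1) := by
          rw [hsplit, List.filter_append, List.filter_cons]
          simp only [hoddb, Bool.false_eq_true, if_false]
        have hfN : (dB.insert t (v.1 + 1, p.2, k)).items.filter
              (fun q => PySem.Int.mod q.2.1 2 == 1)
            = L1.filter (fun q => PySem.Int.mod q.2.1 2 == 1) ++ (t, (v.1 + 1, p.2, k)) ::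
              L2.filter (fun q => PySem.Int.mod q.2.1 2 == 1) := by
          rw [hmap, List.filter_append, List.filter_cons]
          simp only [hoddn, if_true]
        obtain ⟨F', h1, h2, h3⟩ := ih (k + 1) (dA.insert t p.2) (dB.insert t (v.1 + 1, p.2, k))
            (F ++ [(t, (v.1 + 1, p.2, k))])
            (PySem.Dict.nodup_keys_insert _ _ _ hnd)
            hboundB
            (by
              rw [hfN]
              rw [hfO] at hperm
              exact (hperm.append_right _).trans
                ((List.perm_append_singleton _ _).trans List.perm_middle.symm))
            (by
              rw [List.pairwise_append]
              refine ⟨hpair, by simp, ?_⟩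
              intro a ha b hb
              simp at hb
              subst hb
              exact hbound a (hFsub a ha))
            (by
              rw [PySem.Dict.items_insert_of_not_contains _ _ hAt, hitems, List.map_append]
              rfl)
        exact ⟨F', h1, h2, h3⟩
    · -- new key
      have hc' : dB.contains t = false := by simpa using hc
      have htB : t ∉ dB.items.map Prod.fst := by
        intro hmem
        exact hc ((PySem.Dict.contains_iff_mem_keys _ _).mpr hmem)
      have hA : dA.contains t = false := by
        rw [Bool.eq_false_iff]
        intro hA
        rcases List.mem_map.1 ((haKeys t).mp hA) with ⟨q, hq, hq2⟩
        exact htB (List.mem_map.2 ⟨q, List.mem_of_mem_filter hq, hq2⟩)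
      simp only [hc', hA, if_false, Bool.false_eq_true]
      obtain ⟨F', h1, h2, h3⟩ := ih (k+1) (dA.insert t p.2)
          (dB.insert t (0 + 1, p.2, k)) (F ++ [(t, (0 + 1, p.2, k))])
          (PySem.Dict.nodup_keys_insert _ _ _ hnd)
          (by
            intro q hq
            rcases (PySem.Dict.mem_items_insert _ _ _ _).1 hq with h | ⟨h, _⟩
            · subst h; simp
            · exact lt_trans (hbound q h) (by omega))
          (by
            rw [PySem.Dict.items_insert_of_not_contains _ _ hc']
            rw [List.filter_append]
            have hsing : List.filter (fun q => PySem.Int.mod q.2.1 2 == 1)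
                [((t : String), ((0:Int) + 1, p.2, k))] = [(t, (0 + 1, p.2, k))] := by
              simp
            rw [hsing]
            exact hperm.append_right _)
          (by
            rw [List.pairwise_append]
            refine ⟨hpair, by simp, ?_⟩
            intro a ha b hb
            simp at hb
            subst hb
            exact hbound a (hFsub a ha))
          (by
            rw [PySem.Dict.items_insert_of_not_contains _ _ hA, hitems, List.map_append]
            rfl)
      exact ⟨F', h1, h2, h3⟩

-- ===== VERDICT (by name: the statement is the Claim_ definition above) =====
theorem preprocess_note_title_list_spec : Claim_equal_preprocess_note_title_list := by
  intro data _
  unfold Spec_preprocess_note_title_list preprocess_note_title_list preprocess_note_title_list_alt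
  obtain ⟨F', hperm, hpair, hitems⟩ := pv_invariant data 0 PySem.Dict.empty PySem.Dict.empty []
    (by simp [PySem.Dict.empty]) (by simp [PySem.Dict.empty]) (by simp [PySem.Dict.empty]) (by simp) (by simp [PySem.Dict.empty])
  simp only at hperm hpair hitems
  dsimp only
  rw [hitems, PySem.List.sorted_eq_of_perm_of_pairwise_lt _ F' (fun p => p.2.2.2) hperm hpair]
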